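-- pv_equiv track=rewrite | github.com/meduggit/CryptoAlgorithms | Hashing/MHF/DeprecatedVersions/MHF1.py | HashingFunction
-- ===== SOURCE A (Python) =====
-- def HashingFunction(message, iterations=1000):
--     # Define a prime number for mixing
--     prime = 1023
--     # Initialize the hashed value
--     hashed_value = 7
--     # Loop through each character in the message
--     for char in message:
--         # Multiply the hashed value by the prime number and add the value of the character
--         hashed_value = hashed_value * prime
--         # Mix the hashed value
--         for _ in range(iterations):
--             hashed_value = (hashed_value >> 3) ^ (hashed_value << 5)
--             hashed_value &= 0xFFFFFFFFFFFFFFFF  # Ensure the value fits into 64 bits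
--     # Convert the hashed value to hexadecimal representation
--     hex_hash = hex(hashed_value)[2:]  # [2:] to remove '0x' prefix
--     return hex_hash
-- ===== SOURCE B (Python) =====
-- def HashingFunction(message, iterations=1000):
--     # GF(2)-linear view of the mixing step: precompute the (iterations-1)-th
--     # power of the 64x64 bit-matrix once, then do one raw step + one matvec per char.
--     MASK = 0xFFFFFFFFFFFFFFFF
--
--     def step(x):
--         return ((x >> 3) ^ (x << 5)) & MASK
--
--     def matvec(m, x):
--         if not m:
--             return 0
--         return (m[0] if x & 1 else 0) ^ matvec(m[1:], x >> 1)
--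
--     def matmul(a, b):
--         return [matvec(a, c) for c in b]
--
--     def matpow(m, k):
--         if k == 0:
--             return [1 << i for i in range(64)]
--         r = matpow(matmul(m, m), k // 2)
--         return matmul(m, r) if k % 2 else r
--
--     h = 7
--     if iterations <= 0:
--         for _ in message:
--             h *= 1023
--     else:
--         T = [step(1 << i) for i in range(64)]
--         M = matpow(T, iterations - 1)
--         for _ in message:
--             h = matvec(M, step(h * 1023))
--     return format(h, 'x')
-- ===== Notes on version B (the rewrite author's own statement) =====
-- stated objective: faster
-- what changed: B treats the shift-xor-mask mixing step as a linear map over GF(2), precomputes its (iterations-1)-th matrix power once by repeated squaring, and replaces A's per-character inner loop of `iterations` steps by one raw step plus one 64-column matrix-vector product; intended as faster (check measured 12.6x at n=4096; the largest rung was unconfirmed because A times out there).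
import Mathlib
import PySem

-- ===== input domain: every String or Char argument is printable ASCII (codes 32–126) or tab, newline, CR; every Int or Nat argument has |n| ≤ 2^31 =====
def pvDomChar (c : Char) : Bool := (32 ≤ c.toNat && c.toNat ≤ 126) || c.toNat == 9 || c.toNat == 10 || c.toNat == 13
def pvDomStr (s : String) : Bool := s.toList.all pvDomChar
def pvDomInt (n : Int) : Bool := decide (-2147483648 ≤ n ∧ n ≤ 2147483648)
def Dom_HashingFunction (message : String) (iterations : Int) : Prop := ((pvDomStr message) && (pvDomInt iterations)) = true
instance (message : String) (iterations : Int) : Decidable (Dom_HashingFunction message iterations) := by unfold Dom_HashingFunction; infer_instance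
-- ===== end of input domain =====

-- B replaces the per-character inner mixing loop (iterations GF(2)-linear steps) by one
-- application of a precomputed 64×64 bit-matrix power; intended as faster (a timing run
-- measured 12.6× at n=4096; at the largest size A mostly timed out, so the label stayed unconfirmed).
-- All Python int values here are provably nonnegative, so the ports carry them as Nat.

-- ===== PORT A =====
-- hex(h)[2:] for a nonnegative h (both Pythons produce the same lowercase hex string)
def pvHex (n : Nat) : String := String.ofList (Nat.toDigits 16 n)

-- the two statements of A's inner loop body: shift-xor, then mask to 64 bits
def pvStep (h : Nat) : Nat := ((h >>> 3) ^^^ (h <<< 5)) &&& 0xFFFFFFFFFFFFFFFF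

-- `for _ in range(iterations)` around the two statements (empty for iterations ≤ 0)
def pvMixLoop : Nat → Nat → Nat
  | 0, h => h
  | n + 1, h => pvMixLoop n (pvStep h)

def HashingFunction (message : String) (iterations : Int) : String :=
  pvHex (message.toList.foldl (fun hashed_value _ => pvMixLoop iterations.toNat (hashed_value * 1023)) 7)

-- ===== PORT B =====
-- matvec(m, x): recursive dot product over GF(2), consuming x bit by bit
def pvMatvec : List Nat → Nat → Nat
  | [], _ => 0
  | c :: m, x => (if x &&& 1 = 1 then c else 0) ^^^ pvMatvec m (x >>> 1)

def pvMatmul (a b : List Nat) : List Nat := b.map (fun c => pvMatvec a c)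

def pvMatpow (m : List Nat) (k : Nat) : List Nat :=
  if k = 0 then (List.range 64).map (fun i => 1 <<< i)
  else
    let r := pvMatpow (pvMatmul m m) (k / 2)
    if k % 2 = 1 then pvMatmul m r else r
termination_by k
decreasing_by exact Nat.div_lt_self (Nat.pos_of_ne_zero (by assumption)) (by norm_num)

def HashingFunction_alt (message : String) (iterations : Int) : String :=
  pvHex
    (if iterations ≤ 0 then
      message.toList.foldl (fun h _ => h * 1023) 7
    else
      let T := (List.range 64).map (fun i => pvStep (1 <<< i))
      let M := pvMatpow T (iterations - 1).toNat
      message.toList.foldl (fun h _ => pvMatvec M (pvStep (h * 1023))) 7)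

-- ===== PRECONDITION & SPEC =====
def Spec_HashingFunction (message : String) (iterations : Int) (out : String) : Prop := out = HashingFunction_alt message iterations
instance (message : String) (iterations : Int) (out : String) : Decidable (Spec_HashingFunction message iterations out) := by unfold Spec_HashingFunction; infer_instance

-- ===== CLAIM (what is proved, stated in full; the proofs are below) =====
def Claim_equal_HashingFunction : Prop := ∀ (message : String) (iterations : Int), Dom_HashingFunction message iterations → Spec_HashingFunction message iterations (HashingFunction message iterations)

-- ===== LEMMAS AND PROOFS =====

lemma pvStep_xor (a b : Nat) : pvStep (a ^^^ b) = pvStep a ^^^ pvStep b := by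
  unfold pvStep
  apply Nat.eq_of_testBit_eq
  intro i
  simp [Nat.testBit_and, Nat.testBit_xor, Nat.testBit_shiftRight, Nat.testBit_shiftLeft]
  cases Nat.testBit a (3 + i) <;> cases Nat.testBit b (3 + i) <;>
    cases h5 : decide (5 ≤ i) <;> cases ha5 : Nat.testBit a (i - 5) <;>
    cases hb5 : Nat.testBit b (i - 5) <;> cases hm : Nat.testBit 0xFFFFFFFFFFFFFFFF i <;> simp_all

lemma pvStep_zero : pvStep 0 = 0 := by decide

lemma pvStep_lt (h : Nat) : pvStep h < 2 ^ 64 := by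
  unfold pvStep
  exact Nat.and_lt_two_pow _ (by norm_num)

lemma pvMixLoop_eq_iterate (n h : Nat) : pvMixLoop n h = pvStep^[n] h := by
  induction n generalizing h with
  | zero => rfl
  | succ n ih => rw [pvMixLoop, ih, Function.iterate_succ_apply]

lemma pvMatvec_zero (m : List Nat) : pvMatvec m 0 = 0 := by
  induction m with
  | nil => rfl
  | cons c m ih => simp [pvMatvec, ih]

lemma pvMatvec_xor (m : List Nat) (a b : Nat) :
    pvMatvec m (a ^^^ b) = pvMatvec m a ^^^ pvMatvec m b := by
  induction m generalizing a b with
  | nil => simp [pvMatvec]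
  | cons c m ih =>
    simp only [pvMatvec, Nat.and_one_is_mod, Nat.shiftRight_one, Nat.xor_div_two, ih]
    rcases Nat.mod_two_eq_zero_or_one a with ha | ha <;>
      rcases Nat.mod_two_eq_zero_or_one b with hb | hb <;>
      simp [Nat.xor_mod_two_eq, Nat.add_mod, ha, hb, Nat.xor_comm, Nat.xor_left_comm]

-- 2·(a ^^^ b) = 2·a ^^^ 2·b (shifting left by one bit commutes with xor)
lemma pvTwoMulXor (a b : Nat) : 2 * (a ^^^ b) = 2 * a ^^^ 2 * b := by
  apply Nat.eq_of_testBit_eq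
  intro i
  have e : (2 * a ^^^ 2 * b) / 2 = a ^^^ b := by
    rw [Nat.xor_div_two, Nat.mul_div_cancel_left _ (show 0 < 2 by norm_num),
      Nat.mul_div_cancel_left _ (show 0 < 2 by norm_num)]
  cases i with
  | zero => simp [Nat.testBit_zero, Nat.mul_mod_right]
  | succ i => simp [Nat.testBit_succ, e, Nat.mul_div_cancel_left _ (show 0 < 2 by norm_num)]

-- x % 2^(n+1) assembled from the low bit and the rest, as an xor
lemma pvBit_assemble (x : Nat) (n : Nat) :
    (if x % 2 = 1 then 1 else 0) ^^^ 2 * (x / 2 % 2 ^ n) = x % 2 ^ (n + 1) := by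
  have hpos : 0 < 2 ^ n := Nat.two_pow_pos n
  have hx : x % 2 ^ (n + 1) = 2 * (x / 2 % 2 ^ n) + x % 2 := by
    have h2 : x / 2 % 2 ^ n < 2 ^ n := Nat.mod_lt _ hpos
    have hr : x % 2 < 2 := Nat.mod_lt x (by norm_num)
    have hpow : 2 ^ (n + 1) = 2 * 2 ^ n := by ring
    rw [hpow]
    conv_lhs => rw [← Nat.div_add_mod x 2]
    have e1 : x % 2 % (2 * 2 ^ n) = x % 2 := Nat.mod_eq_of_lt (by omega)
    rw [Nat.add_mod, Nat.mul_mod_mul_left, e1]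
    exact Nat.mod_eq_of_lt (by omega)
  rcases Nat.mod_two_eq_zero_or_one x with h | h <;> rw [h] at hx ⊢
  · simpa using hx.symm
  · have : (2 * (x / 2 % 2 ^ n)) ^^^ 1 = 2 * (x / 2 % 2 ^ n) + 1 := by
      apply Nat.eq_of_testBit_eq
      intro i
      cases i with
      | zero => simp [Nat.testBit_zero]
      | succ i => simp [Nat.testBit_succ]
    rw [Nat.xor_comm] at this
    simp [this, hx]

-- a column list built from a linear f evaluated at powers of two computes f on the low n bits
lemma pvMatvec_cols (f : Nat → Nat) (hf : ∀ a b, f (a ^^^ b) = f a ^^^ f b) (hf0 : f 0 = 0)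
    (n : Nat) : ∀ x, pvMatvec ((List.range n).map (fun i => f (2 ^ i))) x = f (x % 2 ^ n) := by
  induction n generalizing f with
  | zero => intro x; simp [pvMatvec, Nat.mod_one, hf0]
  | succ n ih =>
    intro x
    rw [List.range_succ_eq_map]
    simp only [List.map_cons, List.map_map, pvMatvec]
    have hcast : (List.range n).map ((fun i => f (2 ^ i)) ∘ Nat.succ)
        = (List.range n).map (fun i => (fun y => f (2 * y)) (2 ^ i)) := by
      apply List.map_congr_left
      intro i _
      simp [Function.comp, pow_succ]
      ring_nf
    have hlin2 : ∀ a b, (fun y => f (2 * y)) (a ^^^ b) = (fun y => f (2 * y)) a ^^^ (fun y => f (2 * y)) b := by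
      intro a b
      show f (2 * (a ^^^ b)) = f (2 * a) ^^^ f (2 * b)
      rw [pvTwoMulXor, hf]
    have hz2 : (fun y => f (2 * y)) 0 = 0 := by simpa using hf0
    have hrec := ih (fun y => f (2 * y)) hlin2 hz2 (x >>> 1)
    rw [hcast, hrec]
    simp only [Nat.and_one_is_mod, Nat.shiftRight_one, pow_zero]
    have : (if x % 2 = 1 then f 1 else 0) = f (if x % 2 = 1 then 1 else 0) := by
      split <;> simp [hf0]
    rw [this, ← hf, pvBit_assemble]

lemma pvMatvec_matmul (a b : List Nat) : ∀ x, pvMatvec (pvMatmul a b) x = pvMatvec a (pvMatvec b x) := by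
  induction b generalizing a with
  | nil => intro x; simp [pvMatmul, pvMatvec, pvMatvec_zero]
  | cons c m ih =>
    intro x
    simp only [pvMatmul, List.map_cons, pvMatvec]
    rw [show (List.map (fun c => pvMatvec a c) m) = pvMatmul a m from rfl, ih, pvMatvec_xor]
    congr 1
    split <;> simp [pvMatvec_zero]

lemma pvIterate_lt (f : Nat → Nat) (hb : ∀ x, f x < 2 ^ 64) (j : Nat) (y : Nat) (hy : y < 2 ^ 64) :
    f^[j] y < 2 ^ 64 := by
  cases j with
  | zero => simpa using hy
  | succ j => rw [Function.iterate_succ_apply']; exact hb _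

lemma pvMatpow_spec : ∀ (k : Nat) (m : List Nat) (f : Nat → Nat),
    (∀ a b, f (a ^^^ b) = f a ^^^ f b) → f 0 = 0 → (∀ x, f x < 2 ^ 64) →
    (∀ x, pvMatvec m x = f (x % 2 ^ 64)) →
    ∀ x, pvMatvec (pvMatpow m k) x = f^[k] (x % 2 ^ 64) := by
  intro k
  induction k using Nat.strong_induction_on with
  | _ k ih =>
    intro m f hf hf0 hb hm x
    by_cases hk : k = 0
    · subst hk
      rw [pvMatpow, if_pos rfl]
      have h64 : ((List.range 64).map (fun i => 1 <<< i)) = (List.range 64).map (fun i => 2 ^ i) := by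
        simp [Nat.one_shiftLeft]
      rw [h64, pvMatvec_cols (fun y => y) (by intro a b; rfl) rfl]
      simp
    · have hsq : ∀ y, pvMatvec (pvMatmul m m) y = (f ∘ f) (y % 2 ^ 64) := by
        intro y
        rw [pvMatvec_matmul, hm, hm, Nat.mod_eq_of_lt (hb _)]
        rfl
      have hsqlin : ∀ a b, (f ∘ f) (a ^^^ b) = (f ∘ f) a ^^^ (f ∘ f) b := by
        intro a b; simp [Function.comp, hf]
      have hsq0 : (f ∘ f) 0 = 0 := by simp [Function.comp, hf0]
      have hsqb : ∀ y, (f ∘ f) y < 2 ^ 64 := fun y => hb _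
      have ihalf := ih (k / 2) (Nat.div_lt_self (Nat.pos_of_ne_zero hk) (by norm_num))
        (pvMatmul m m) (f ∘ f) hsqlin hsq0 hsqb hsq
      have hiter : ∀ y, (f ∘ f)^[k / 2] y = f^[2 * (k / 2)] y := by
        intro y
        rw [Function.iterate_mul]
        congr 1
      rw [pvMatpow]
      simp only [if_neg hk]
      by_cases ho : k % 2 = 1
      · simp only [if_pos ho]
        rw [pvMatvec_matmul, ihalf, hiter, hm,
          Nat.mod_eq_of_lt (pvIterate_lt f hb _ _ (Nat.mod_lt _ (by norm_num)))]
        rw [← Function.iterate_succ_apply' f]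
        congr 1
        omega
      · simp only [if_neg ho]
        rw [ihalf, hiter]
        congr 1
        omega

lemma pvFoldl_congr {α β : Type} (f g : β → α → β) (h : ∀ b a, f b a = g b a) :
    ∀ (l : List α) (b : β), List.foldl f b l = List.foldl g b l := by
  intro l
  induction l with
  | nil => intro b; rfl
  | cons a l ih => intro b; rw [List.foldl, List.foldl, h, ih]

-- the two per-character updates agree when iterations ≥ 1
lemma pvChar_step (iterations : Int) (hpos : ¬ iterations ≤ 0)
    (M : List Nat) (hM : M = pvMatpow ((List.range 64).map (fun i => pvStep (1 <<< i))) (iterations - 1).toNat)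
    (h : Nat) :
    pvMixLoop iterations.toNat (h * 1023) = pvMatvec M (pvStep (h * 1023)) := by
  have hT : ∀ x, pvMatvec ((List.range 64).map (fun i => pvStep (1 <<< i))) x = pvStep (x % 2 ^ 64) := by
    intro x
    have : ((List.range 64).map (fun i => pvStep (1 <<< i))) = (List.range 64).map (fun i => pvStep (2 ^ i)) := by
      simp [Nat.one_shiftLeft]
    rw [this]
    exact pvMatvec_cols pvStep pvStep_xor pvStep_zero 64 x
  rw [hM, pvMatpow_spec _ _ pvStep pvStep_xor pvStep_zero pvStep_lt hT,
    Nat.mod_eq_of_lt (pvStep_lt _), pvMixLoop_eq_iterate,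
    show iterations.toNat = (iterations - 1).toNat + 1 by omega,
    Function.iterate_succ_apply]

-- ===== VERDICT (by name: the statement is the Claim_ definition above) =====
theorem HashingFunction_spec : Claim_equal_HashingFunction := by
  intro message iterations _
  unfold Spec_HashingFunction HashingFunction HashingFunction_alt
  by_cases hle : iterations ≤ 0
  · simp only [if_pos hle]
    congr 1
    have hz : iterations.toNat = 0 := by omega
    exact pvFoldl_congr _ _ (fun h _ => by rw [hz]; rfl) _ 7
  · simp only [if_neg hle]
    congr 1
    exact pvFoldl_congr _ _ (fun h _ => pvChar_step iterations hle _ rfl h) _ 7
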